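-- pv_equiv track=rewrite | github.com/HoMuChen/fire-auto | backtest_research_v2.py | strategy_consecutive_red
-- ===== SOURCE A (Python) =====
-- def strategy_consecutive_red(prices, n_red=3, hold_days=5):
--     """連續 N 天收黑買入，持有固定天數賣出"""
--     signals = [None] * len(prices)
--     pos = False
--     entry_i = 0
--     for i in range(n_red, len(prices)):
--         if not pos:
--             all_red = all(prices[i-j]["close"] < prices[i-j]["open"] for j in range(n_red))
--             if all_red:
--                 signals[i] = "buy"
--                 pos = True
--                 entry_i = i
--         elif pos and (i - entry_i) >= hold_days:
--             signals[i] = "sell"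
--             pos = False
--     return signals
-- ===== SOURCE B (Python) =====
-- def strategy_consecutive_red(prices, n_red=3, hold_days=5):
--     """連續 N 天收黑買入，持有固定天數賣出 — running consecutive-red counter instead of re-scanning the window"""
--     signals = [None] * len(prices)
--     pos = False
--     entry_i = 0
--     run = 0  # consecutive red candles ending at the last scanned index
--     if 0 < n_red < len(prices):
--         # seed the counter with the candles before the first checked index
--         # (index 0 never belongs to a checked window)
--         for j in range(1, n_red):
--             run = run + 1 if prices[j]["close"] < prices[j]["open"] else 0
--     for i in range(n_red, len(prices)):
--         if n_red > 0:
--             run = run + 1 if prices[i]["close"] < prices[i]["open"] else 0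
--         if not pos:
--             if run >= n_red:
--                 signals[i] = "buy"
--                 pos = True
--                 entry_i = i
--         elif i - entry_i >= hold_days:
--             signals[i] = "sell"
--             pos = False
--     return signals
-- ===== Notes on version B (the rewrite author's own statement) =====
-- stated objective: alternative
-- what changed: B replaces A's inner all() re-scan of the last n_red candles at every index by a running consecutive-red counter, seeded once over the candles before the first checked index and updated in O(1) per step; the inner window scan disappears.
import Mathlib
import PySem

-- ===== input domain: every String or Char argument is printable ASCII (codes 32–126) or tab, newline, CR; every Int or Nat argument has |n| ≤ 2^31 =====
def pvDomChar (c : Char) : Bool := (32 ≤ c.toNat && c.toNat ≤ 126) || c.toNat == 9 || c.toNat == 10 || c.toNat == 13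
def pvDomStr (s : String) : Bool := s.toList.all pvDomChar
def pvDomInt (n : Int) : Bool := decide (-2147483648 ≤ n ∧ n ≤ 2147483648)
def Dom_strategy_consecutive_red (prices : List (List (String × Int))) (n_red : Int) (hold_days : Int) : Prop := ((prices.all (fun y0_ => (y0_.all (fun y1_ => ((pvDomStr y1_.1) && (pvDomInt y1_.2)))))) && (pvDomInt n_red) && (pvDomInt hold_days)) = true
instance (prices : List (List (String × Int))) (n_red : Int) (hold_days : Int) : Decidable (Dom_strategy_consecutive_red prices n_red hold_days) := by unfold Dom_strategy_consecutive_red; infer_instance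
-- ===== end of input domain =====

-- B replaces A's inner all() re-scan of the last n_red candles at every index by a running
-- consecutive-red counter seeded once before the loop, updated in O(1) per step (objective: alternative).
-- ===== PORT A =====
-- loop body of A's `for i in range(n_red, len(prices))`, hoisted as a helper
def pvStepA (prices : List (List (String × Int))) (n_red hold_days : Int)
    (st : List (Option String) × Bool × Int) (i : Int) : List (Option String) × Bool × Int :=
  let signals := st.1
  let pos := st.2.1
  let entry_i := st.2.2
  if pos = false then
    let all_red := (PySem.List.pyRange 0 n_red 1).all (fun j =>
      decide (PySem.Dict.getD (PySem.Dict.mk (PySem.List.pyGetD prices (i - j) [])) "close" 0 <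
              PySem.Dict.getD (PySem.Dict.mk (PySem.List.pyGetD prices (i - j) [])) "open" 0))
    if all_red then (PySem.List.pySetD signals i (some "buy"), true, i)
    else (signals, pos, entry_i)
  else if i - entry_i ≥ hold_days then (PySem.List.pySetD signals i (some "sell"), false, entry_i)
  else (signals, pos, entry_i)

def strategy_consecutive_red (prices : List (List (String × Int))) (n_red : Int) (hold_days : Int) : List (Option String) :=
  ((PySem.List.pyRange n_red (prices.length : Int) 1).foldl (pvStepA prices n_red hold_days)
    (List.replicate prices.length none, false, 0)).1

-- ===== PORT B =====
def pvRed (p : List (String × Int)) : Bool :=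
  decide (PySem.Dict.getD (PySem.Dict.mk p) "close" 0 < PySem.Dict.getD (PySem.Dict.mk p) "open" 0)

-- loop body of B's `for i in range(n_red, len(prices))`, hoisted as a helper
def pvStepB (prices : List (List (String × Int))) (n_red hold_days : Int)
    (st : List (Option String) × Bool × Int × Int) (i : Int) : List (Option String) × Bool × Int × Int :=
  let signals := st.1
  let pos := st.2.1
  let entry_i := st.2.2.1
  let run := st.2.2.2
  let run' : Int := if n_red > 0 then (if pvRed (PySem.List.pyGetD prices i []) then run + 1 else 0) else run
  if pos = false then
    if run' ≥ n_red then (PySem.List.pySetD signals i (some "buy"), true, i, run')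
    else (signals, pos, entry_i, run')
  else if i - entry_i ≥ hold_days then (PySem.List.pySetD signals i (some "sell"), false, entry_i, run')
  else (signals, pos, entry_i, run')

def strategy_consecutive_red_alt (prices : List (List (String × Int))) (n_red : Int) (hold_days : Int) : List (Option String) :=
  ((PySem.List.pyRange n_red (prices.length : Int) 1).foldl (pvStepB prices n_red hold_days)
    (List.replicate prices.length none, false, 0,
     if 0 < n_red ∧ n_red < (prices.length : Int) then
       (PySem.List.pyRange 1 n_red 1).foldl
         (fun (run : Int) j => if pvRed (PySem.List.pyGetD prices j []) then run + 1 else 0) 0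
     else 0)).1

-- ===== PRECONDITION & SPEC =====
-- Pre_ excludes the inputs on which the Python A raises: n_red < -len(prices) (IndexError on the
-- buy assignment) and price lists where a candle A's window scan reads lacks the "close" or
-- "open" key (KeyError); it also excludes, when 0 < n_red < len, lists with an unkeyed candle at
-- index ≥ 1 that A happens to skip (e.g. while holding) but B's single scan reads and raises on.
def Pre_strategy_consecutive_red (prices : List (List (String × Int))) (n_red : Int) (hold_days : Int) : Prop :=
  (n_red < 0 → -(prices.length : Int) ≤ n_red) ∧
  (0 < n_red → n_red < (prices.length : Int) →
    ∀ p ∈ prices.drop 1, (PySem.Dict.mk p).contains "close" = true ∧ (PySem.Dict.mk p).contains "open" = true)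
instance (prices : List (List (String × Int))) (n_red : Int) (hold_days : Int) : Decidable (Pre_strategy_consecutive_red prices n_red hold_days) := by unfold Pre_strategy_consecutive_red; infer_instance

def pvWitness_strategy_consecutive_red : (List (List (String × Int))) × Int × Int :=
  ([[("close", 1), ("open", 2)], [("close", 1), ("open", 3)], [("close", 5), ("open", 2)]], 1, 1)

def Spec_strategy_consecutive_red (prices : List (List (String × Int))) (n_red : Int) (hold_days : Int) (out : List (Option String)) : Prop := out = strategy_consecutive_red_alt prices n_red hold_days
instance (prices : List (List (String × Int))) (n_red : Int) (hold_days : Int) (out : List (Option String)) : Decidable (Spec_strategy_consecutive_red prices n_red hold_days out) := by unfold Spec_strategy_consecutive_red; infer_instance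

-- ===== CLAIM (what is proved, stated in full; the proofs are below) =====
def Claim_equal_strategy_consecutive_red : Prop := ∀ (prices : List (List (String × Int))) (n_red : Int) (hold_days : Int), Dom_strategy_consecutive_red prices n_red hold_days → Pre_strategy_consecutive_red prices n_red hold_days → Spec_strategy_consecutive_red prices n_red hold_days (strategy_consecutive_red prices n_red hold_days)

-- ===== LEMMAS AND PROOFS =====

-- evaluation of A's loop body in each state
theorem pvStepA_buy (prices : List (List (String × Int))) (n_red hold_days : Int)
    (sig : List (Option String)) (entry i : Int)
    (h : ((PySem.List.pyRange 0 n_red 1).all (fun j =>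
      decide (PySem.Dict.getD (PySem.Dict.mk (PySem.List.pyGetD prices (i - j) [])) "close" 0 <
              PySem.Dict.getD (PySem.Dict.mk (PySem.List.pyGetD prices (i - j) [])) "open" 0))) = true) :
    pvStepA prices n_red hold_days (sig, false, entry) i = (PySem.List.pySetD sig i (some "buy"), true, i) := by
  simp [pvStepA, h]

theorem pvStepA_nobuy (prices : List (List (String × Int))) (n_red hold_days : Int)
    (sig : List (Option String)) (entry i : Int)
    (h : ((PySem.List.pyRange 0 n_red 1).all (fun j =>
      decide (PySem.Dict.getD (PySem.Dict.mk (PySem.List.pyGetD prices (i - j) [])) "close" 0 <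
              PySem.Dict.getD (PySem.Dict.mk (PySem.List.pyGetD prices (i - j) [])) "open" 0))) = false) :
    pvStepA prices n_red hold_days (sig, false, entry) i = (sig, false, entry) := by
  simp [pvStepA, h]

theorem pvStepA_sell (prices : List (List (String × Int))) (n_red hold_days : Int)
    (sig : List (Option String)) (entry i : Int) (h : i - entry ≥ hold_days) :
    pvStepA prices n_red hold_days (sig, true, entry) i = (PySem.List.pySetD sig i (some "sell"), false, entry) := by
  simp [pvStepA, h]

theorem pvStepA_nosell (prices : List (List (String × Int))) (n_red hold_days : Int)
    (sig : List (Option String)) (entry i : Int) (h : ¬ i - entry ≥ hold_days) :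
    pvStepA prices n_red hold_days (sig, true, entry) i = (sig, true, entry) := by
  simp [pvStepA, h]

-- evaluation of B's loop body in each state (run' abbreviates B's counter update)
theorem pvStepB_buy (prices : List (List (String × Int))) (n_red hold_days : Int)
    (sig : List (Option String)) (entry i run : Int)
    (h : (if n_red > 0 then (if pvRed (PySem.List.pyGetD prices i []) then run + 1 else 0) else run) ≥ n_red) :
    pvStepB prices n_red hold_days (sig, false, entry, run) i =
      (PySem.List.pySetD sig i (some "buy"), true, i,
       (if n_red > 0 then (if pvRed (PySem.List.pyGetD prices i []) then run + 1 else 0) else run)) := by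
  simp [pvStepB, h]

theorem pvStepB_nobuy (prices : List (List (String × Int))) (n_red hold_days : Int)
    (sig : List (Option String)) (entry i run : Int)
    (h : ¬ (if n_red > 0 then (if pvRed (PySem.List.pyGetD prices i []) then run + 1 else 0) else run) ≥ n_red) :
    pvStepB prices n_red hold_days (sig, false, entry, run) i =
      (sig, false, entry,
       (if n_red > 0 then (if pvRed (PySem.List.pyGetD prices i []) then run + 1 else 0) else run)) := by
  simp [pvStepB, h]

theorem pvStepB_sell (prices : List (List (String × Int))) (n_red hold_days : Int)
    (sig : List (Option String)) (entry i run : Int) (h : i - entry ≥ hold_days) :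
    pvStepB prices n_red hold_days (sig, true, entry, run) i =
      (PySem.List.pySetD sig i (some "sell"), false, entry,
       (if n_red > 0 then (if pvRed (PySem.List.pyGetD prices i []) then run + 1 else 0) else run)) := by
  simp [pvStepB, h]

theorem pvStepB_nosell (prices : List (List (String × Int))) (n_red hold_days : Int)
    (sig : List (Option String)) (entry i run : Int) (h : ¬ i - entry ≥ hold_days) :
    pvStepB prices n_red hold_days (sig, true, entry, run) i =
      (sig, true, entry,
       (if n_red > 0 then (if pvRed (PySem.List.pyGetD prices i []) then run + 1 else 0) else run)) := by
  simp [pvStepB, h]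

-- consecutive-red counter over candles 1..k (index 0 never belongs to a checked window)
def pvR (prices : List (List (String × Int))) : Nat → Int
  | 0 => 0
  | k + 1 => if pvRed (prices.getD (k + 1) []) then pvR prices k + 1 else 0

theorem pvR_nonneg (prices : List (List (String × Int))) (k : Nat) : 0 ≤ pvR prices k := by
  induction k with
  | zero => simp [pvR]
  | succ k ih => simp only [pvR]; split <;> omega

-- crux: counter ≥ n exactly when the n candles ending at index k are all red
theorem pvR_window (prices : List (List (String × Int))) :
    ∀ (n k : Nat), n ≤ k →
    ((pvR prices k ≥ (n : Int)) ↔ ∀ j < n, pvRed (prices.getD (k - j) []) = true) := by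
  intro n
  induction n with
  | zero => intro k _; simp; exact pvR_nonneg prices k
  | succ n ih =>
    intro k hk
    obtain ⟨m, rfl⟩ : ∃ m, k = m + 1 := ⟨k - 1, by omega⟩
    by_cases hred : pvRed (prices.getD (m + 1) []) = true
    · have hrec : pvR prices (m + 1) = pvR prices m + 1 := by
        simp only [pvR, hred]; simp
      rw [hrec]
      have hIH := ih m (by omega)
      constructor
      · intro h j hj
        cases j with
        | zero => simpa using hred
        | succ j' =>
          have hj' : j' < n := by omega
          have hle : pvR prices m ≥ (n : Int) := by push_cast at h ⊢; omega
          have := (hIH.mp hle) j' hj'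
          simpa [Nat.succ_sub_succ] using this
      · intro h
        have hle : pvR prices m ≥ (n : Int) := by
          apply hIH.mpr
          intro j hj
          have := h (j + 1) (by omega)
          simpa [Nat.succ_sub_succ] using this
        push_cast; omega
    · have hred' : pvRed (prices.getD (m + 1) []) = false := by simpa using hred
      have hrec : pvR prices (m + 1) = 0 := by
        simp only [pvR, hred']; simp
      rw [hrec]
      constructor
      · intro h; push_cast at h; omega
      · intro h
        exact absurd (by simpa using h 0 (by omega)) hred

-- B's seeding loop over range(1, n_red) computes pvR (n_red - 1)
theorem pv_seed (prices : List (List (String × Int))) :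
    ∀ (m : Nat),
    (PySem.List.pyRange 1 ((m : Int) + 1) 1).foldl
      (fun (run : Int) j => if pvRed (PySem.List.pyGetD prices j []) then run + 1 else 0) 0
    = pvR prices m := by
  intro m
  induction m with
  | zero => rw [show ((0 : Nat) : Int) + 1 = 1 by norm_num, PySem.List.pyRange_one_eq_nil (by omega)]; simp [pvR]
  | succ m ih =>
    rw [show ((m + 1 : Nat) : Int) + 1 = ((m : Int) + 1) + 1 by push_cast; ring]
    rw [PySem.List.pyRange_one_succ_right (by omega), List.foldl_append, ih]
    simp only [List.foldl_cons, List.foldl_nil]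
    have : PySem.List.pyGetD prices ((m : Int) + 1) [] = prices.getD (m + 1) [] := by
      rw [show (m : Int) + 1 = ((m + 1 : Nat) : Int) by push_cast; ring, PySem.List.pyGetD_natCast]
    rw [this]
    simp [pvR]

-- the two loops run in lockstep: for n_red = n ≥ 0, from index k ≥ n with counter pvR (k-1)
theorem pv_par (prices : List (List (String × Int))) (n_red hold_days : Int) (n : Nat)
    (hn : n_red = (n : Int)) :
    ∀ (fuel k : Nat) (a : Int) (pos : Bool) (entry : Int) (sig : List (Option String)) (R : Int),
    a = (k : Int) → k + fuel = prices.length → n ≤ k →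
    R = (if 0 < n then pvR prices (k - 1) else 0) →
    ((PySem.List.pyRange a (prices.length : Int) 1).foldl (pvStepB prices n_red hold_days)
      (sig, pos, entry, R)).1
    = ((PySem.List.pyRange a (prices.length : Int) 1).foldl (pvStepA prices n_red hold_days)
      (sig, pos, entry)).1 := by
  intro fuel
  induction fuel with
  | zero =>
    intro k a pos entry sig R ha hlen hnk hR
    rw [PySem.List.pyRange_one_eq_nil (by omega)]
    simp
  | succ fuel ih =>
    intro k a pos entry sig R ha hlen hnk hR
    subst ha
    have hklt : k < prices.length := by omega
    rw [PySem.List.pyRange_one_cons (by exact_mod_cast hklt), List.foldl_cons, List.foldl_cons]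
    -- the updated counter equals pvR k (or stays 0 when n = 0)
    have hrun' : (if n_red > 0 then (if pvRed (PySem.List.pyGetD prices (k : Int) []) then R + 1 else 0) else R)
        = (if 0 < n then pvR prices k else 0) := by
      by_cases hpos : 0 < n
      · have hg : n_red > 0 := by omega
        obtain ⟨m, rfl⟩ : ∃ m, k = m + 1 := ⟨k - 1, by omega⟩
        rw [if_pos hg, if_pos hpos, PySem.List.pyGetD_natCast]
        rw [hR, if_pos hpos]
        simp [pvR]
      · have hn0 : n = 0 := by omega
        have hg : ¬ n_red > 0 := by omega
        rw [if_neg hg, if_neg hpos, hR, if_neg hpos]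
    -- buy condition equivalence at index k
    have hcond : ((if n_red > 0 then (if pvRed (PySem.List.pyGetD prices (k : Int) []) then R + 1 else 0) else R) ≥ n_red)
        ↔ ((PySem.List.pyRange 0 n_red 1).all (fun j =>
            decide (PySem.Dict.getD (PySem.Dict.mk (PySem.List.pyGetD prices ((k : Int) - j) [])) "close" 0 <
                    PySem.Dict.getD (PySem.Dict.mk (PySem.List.pyGetD prices ((k : Int) - j) [])) "open" 0)) = true) := by
      rw [hrun']
      by_cases hpos : 0 < n
      · rw [if_pos hpos, List.all_eq_true, hn]
        rw [pvR_window prices n k hnk]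
        constructor
        · intro h j hmem
          rw [PySem.List.mem_pyRange_one] at hmem
          obtain ⟨h0, hjn⟩ := hmem
          have hjn' : j.toNat < n := by omega
          have hcast : (k : Int) - j = ((k - j.toNat : Nat) : Int) := by omega
          rw [hcast, PySem.List.pyGetD_natCast]
          have := h j.toNat hjn'
          simpa [pvRed] using this
        · intro h j hj
          have hmem : ((j : Int)) ∈ PySem.List.pyRange 0 (n : Int) 1 := by
            rw [PySem.List.mem_pyRange_one]
            constructor
            · exact_mod_cast Int.natCast_nonneg j
            · exact_mod_cast hj
          have hcast : (k : Int) - (j : Int) = ((k - j : Nat) : Int) := by omega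
          have := h _ hmem
          rw [hcast, PySem.List.pyGetD_natCast] at this
          simpa [pvRed] using this
      · have hn0 : n = 0 := by omega
        rw [if_neg hpos]
        constructor
        · intro _
          rw [PySem.List.pyRange_one_eq_nil (by omega)]
          rfl
        · intro _
          rw [hn, hn0]
          norm_num
    have hR' : (if n_red > 0 then (if pvRed (PySem.List.pyGetD prices (k : Int) []) then R + 1 else 0) else R)
        = (if 0 < n then pvR prices ((k + 1) - 1) else 0) := by
      rw [hrun']; congr 1
    cases pos with
    | false =>
      by_cases hbuy : (if n_red > 0 then (if pvRed (PySem.List.pyGetD prices (k : Int) []) then R + 1 else 0) else R) ≥ n_red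
      · rw [pvStepB_buy prices n_red hold_days sig entry (k : Int) R hbuy,
            pvStepA_buy prices n_red hold_days sig entry (k : Int) (hcond.mp hbuy)]
        exact ih (k + 1) ((k : Int) + 1) true (k : Int) _ _
          (by push_cast; ring) (by omega) (by omega) hR'
      · have hnored : ¬ ((PySem.List.pyRange 0 n_red 1).all (fun j =>
            decide (PySem.Dict.getD (PySem.Dict.mk (PySem.List.pyGetD prices ((k : Int) - j) [])) "close" 0 <
                    PySem.Dict.getD (PySem.Dict.mk (PySem.List.pyGetD prices ((k : Int) - j) [])) "open" 0)) = true) :=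
          fun h => hbuy (hcond.mpr h)
        rw [pvStepB_nobuy prices n_red hold_days sig entry (k : Int) R hbuy,
            pvStepA_nobuy prices n_red hold_days sig entry (k : Int) (by rw [Bool.eq_false_iff]; exact hnored)]
        exact ih (k + 1) ((k : Int) + 1) false entry _ _
          (by push_cast; ring) (by omega) (by omega) hR'
    | true =>
      by_cases hs : (k : Int) - entry ≥ hold_days
      · rw [pvStepB_sell prices n_red hold_days sig entry (k : Int) R hs,
            pvStepA_sell prices n_red hold_days sig entry (k : Int) hs]
        exact ih (k + 1) ((k : Int) + 1) false entry _ _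
          (by push_cast; ring) (by omega) (by omega) hR'
      · rw [pvStepB_nosell prices n_red hold_days sig entry (k : Int) R hs,
            pvStepA_nosell prices n_red hold_days sig entry (k : Int) hs]
        exact ih (k + 1) ((k : Int) + 1) true entry _ _
          (by push_cast; ring) (by omega) (by omega) hR'

-- for n_red ≤ 0 both loops are the same vacuous-window machine (counter frozen at 0)
theorem pv_neg (prices : List (List (String × Int))) (n_red hold_days : Int) (hneg : n_red ≤ 0) :
    ∀ (fuel : Nat) (a : Int) (pos : Bool) (entry : Int) (sig : List (Option String)),
    a + (fuel : Int) = (prices.length : Int) →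
    ((PySem.List.pyRange a (prices.length : Int) 1).foldl (pvStepB prices n_red hold_days)
      (sig, pos, entry, 0)).1
    = ((PySem.List.pyRange a (prices.length : Int) 1).foldl (pvStepA prices n_red hold_days)
      (sig, pos, entry)).1 := by
  intro fuel
  induction fuel with
  | zero =>
    intro a pos entry sig hlen
    rw [PySem.List.pyRange_one_eq_nil (by omega)]
    simp
  | succ fuel ih =>
    intro a pos entry sig hlen
    have halt : a < (prices.length : Int) := by push_cast at hlen; omega
    rw [PySem.List.pyRange_one_cons halt, List.foldl_cons, List.foldl_cons]
    have hrun0 : (if n_red > 0 then (if pvRed (PySem.List.pyGetD prices a []) then (0 : Int) + 1 else 0) else 0) = 0 := by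
      rw [if_neg (by omega)]
    cases pos with
    | false =>
      have hbuy : (if n_red > 0 then (if pvRed (PySem.List.pyGetD prices a []) then (0 : Int) + 1 else 0) else 0) ≥ n_red := by
        rw [hrun0]; omega
      have hall : ((PySem.List.pyRange 0 n_red 1).all (fun j =>
          decide (PySem.Dict.getD (PySem.Dict.mk (PySem.List.pyGetD prices (a - j) [])) "close" 0 <
                  PySem.Dict.getD (PySem.Dict.mk (PySem.List.pyGetD prices (a - j) [])) "open" 0))) = true := by
        rw [PySem.List.pyRange_one_eq_nil hneg]
        rfl
      rw [pvStepB_buy prices n_red hold_days sig entry a 0 hbuy,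
          pvStepA_buy prices n_red hold_days sig entry a hall, hrun0]
      exact ih (a + 1) true a _ (by push_cast at hlen ⊢; omega)
    | true =>
      by_cases hs : a - entry ≥ hold_days
      · rw [pvStepB_sell prices n_red hold_days sig entry a 0 hs,
            pvStepA_sell prices n_red hold_days sig entry a hs, hrun0]
        exact ih (a + 1) false entry _ (by push_cast at hlen ⊢; omega)
      · rw [pvStepB_nosell prices n_red hold_days sig entry a 0 hs,
            pvStepA_nosell prices n_red hold_days sig entry a hs, hrun0]
        exact ih (a + 1) true entry _ (by push_cast at hlen ⊢; omega)

theorem pv_main (prices : List (List (String × Int))) (n_red hold_days : Int) :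
    strategy_consecutive_red prices n_red hold_days = strategy_consecutive_red_alt prices n_red hold_days := by
  by_cases h0 : 0 ≤ n_red
  · by_cases hlt : n_red < (prices.length : Int)
    · have hn : n_red = ((n_red.toNat : Nat) : Int) := by omega
      have hR0 : (if 0 < n_red ∧ n_red < (prices.length : Int) then
          (PySem.List.pyRange 1 n_red 1).foldl
            (fun (run : Int) j => if pvRed (PySem.List.pyGetD prices j []) then run + 1 else 0) 0
        else 0) = (if 0 < n_red.toNat then pvR prices (n_red.toNat - 1) else 0) := by
        by_cases hp : 0 < n_red
        · rw [if_pos ⟨hp, hlt⟩, if_pos (by omega)]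
          obtain ⟨m, hm⟩ : ∃ m, n_red.toNat = m + 1 := ⟨n_red.toNat - 1, by omega⟩
          rw [show n_red = ((m : Int) + 1) by omega, pv_seed prices m]
          congr 1
        · rw [if_neg (by tauto), if_neg (by omega)]
      have hpar := pv_par prices n_red hold_days n_red.toNat hn
        (prices.length - n_red.toNat) n_red.toNat n_red false 0
        (List.replicate prices.length none)
        (if 0 < n_red.toNat then pvR prices (n_red.toNat - 1) else 0)
        hn (by omega) le_rfl rfl
      rw [← hR0] at hpar
      unfold strategy_consecutive_red strategy_consecutive_red_alt
      exact hpar.symm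
    · unfold strategy_consecutive_red strategy_consecutive_red_alt
      rw [PySem.List.pyRange_one_eq_nil (by omega)]
      simp
  · have hneg : n_red ≤ 0 := by omega
    have hpar := pv_neg prices n_red hold_days hneg ((prices.length : Int) - n_red).toNat n_red false 0
      (List.replicate prices.length none) (by omega)
    have hr0 : (if 0 < n_red ∧ n_red < (prices.length : Int) then
        (PySem.List.pyRange 1 n_red 1).foldl
          (fun (run : Int) j => if pvRed (PySem.List.pyGetD prices j []) then run + 1 else 0) 0
      else 0) = (0 : Int) := by
      rw [if_neg (by omega)]
    unfold strategy_consecutive_red strategy_consecutive_red_alt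
    rw [hr0]
    exact hpar.symm

-- ===== VERDICT (by name: the statement is the Claim_ definition above) =====
theorem strategy_consecutive_red_spec : Claim_equal_strategy_consecutive_red := by
  intro prices n_red hold_days _ _
  unfold Spec_strategy_consecutive_red
  exact pv_main prices n_red hold_days
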